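-- pv_equiv track=rewrite | github.com/Alif108/Artificial-Intelligence | Adversarial Search/Gomoku/gomoku_w_heuristics.py | open_rows
-- ===== SOURCE A (Python) =====
-- EMPTY = '.'
--
-- WIN_LENGTH = 4
--
-- def open_rows(board, player):
--     open_row_count = 0
--     for row in board:
--         for i in range(len(row) - (WIN_LENGTH-1)):
--             window = row[i:i + WIN_LENGTH]
--             if window.count(player) == (WIN_LENGTH-1) and window.count(EMPTY) == 1:
--                 open_row_count += 1
--     return open_row_count
-- ===== SOURCE B (Python) =====
-- EMPTY = '.'
--
-- def open_rows(board, player):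
--     total = 0
--     for row in board:
--         # prefix counts: pp[j] / pe[j] = occurrences of player / EMPTY among row[:j]
--         pp = [0]
--         pe = [0]
--         for ch in row:
--             pp.append(pp[-1] + (ch == player))
--             pe.append(pe[-1] + (ch == EMPTY))
--         for i in range(len(row) - 3):
--             if pp[i + 4] - pp[i] == 3 and pe[i + 4] - pe[i] == 1:
--                 total += 1
--     return total
-- ===== Notes on version B (the rewrite author's own statement) =====
-- stated objective: alternative
-- what changed: B replaces A's per-window slicing and two str.count calls with one prefix-sum pass per row (cumulative counts of player and EMPTY characters) and then tests each window start by two prefix differences.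
import Mathlib
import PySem

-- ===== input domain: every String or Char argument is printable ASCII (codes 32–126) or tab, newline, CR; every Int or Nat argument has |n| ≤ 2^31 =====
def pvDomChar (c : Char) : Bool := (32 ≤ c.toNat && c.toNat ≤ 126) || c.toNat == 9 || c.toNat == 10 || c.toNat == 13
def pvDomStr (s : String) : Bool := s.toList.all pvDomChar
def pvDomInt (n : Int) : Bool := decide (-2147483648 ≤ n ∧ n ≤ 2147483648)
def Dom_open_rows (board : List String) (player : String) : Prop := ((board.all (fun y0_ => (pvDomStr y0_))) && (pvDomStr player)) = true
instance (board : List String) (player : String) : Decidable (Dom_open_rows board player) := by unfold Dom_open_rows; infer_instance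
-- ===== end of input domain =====

-- B replaces A's per-window slicing + str.count calls by one prefix-sum pass per row; alternative decomposition, same value everywhere.


-- ===== PORT A =====
def pyEMPTY : String := "."

-- literal transliteration of A: for each row, for i in range(len(row)-3), slice the
-- window row[i:i+4] and test window.count(player) == 3 and window.count('.') == 1
def open_rows (board : List String) (player : String) : Int :=
  board.foldl (fun acc row =>
    (PySem.List.pyRange 0 (PySem.Str.len row - (4 - 1))).foldl (fun acc i =>
      let window := PySem.Str.slice row (some i) (some (i + 4))
      if (PySem.Str.count window player : Int) = 4 - 1 ∧ (PySem.Str.count window pyEMPTY : Int) = 1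
      then acc + 1 else acc) acc) 0

-- ===== PORT B =====
-- transliteration of Source B: per row build prefix-count lists pp/pe ([0] then append
-- pp[-1] + (ch == player) resp. pe[-1] + (ch == EMPTY)), then for each window start i
-- test the two prefix differences.
def open_rows_alt (board : List String) (player : String) : Int :=
  board.foldl (fun total row =>
    let ps := row.toList.foldl (fun (s : List Int × List Int) ch =>
      (s.1 ++ [PySem.List.pyGetD s.1 (-1) 0 + (if String.ofList [ch] = player then 1 else 0)],
       s.2 ++ [PySem.List.pyGetD s.2 (-1) 0 + (if String.ofList [ch] = pyEMPTY then 1 else 0)]))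
      (([0], [0]) : List Int × List Int)
    (PySem.List.pyRange 0 (PySem.Str.len row - 3)).foldl (fun t i =>
      if PySem.List.pyGetD ps.1 (i + 4) 0 - PySem.List.pyGetD ps.1 i 0 = 3 ∧
         PySem.List.pyGetD ps.2 (i + 4) 0 - PySem.List.pyGetD ps.2 i 0 = 1
      then t + 1 else t) total) 0

-- ===== PRECONDITION & SPEC =====
def Spec_open_rows (board : List String) (player : String) (out : Int) : Prop := out = open_rows_alt board player
instance (board : List String) (player : String) (out : Int) : Decidable (Spec_open_rows board player out) := by unfold Spec_open_rows; infer_instance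

-- ===== CLAIM (what is proved, stated in full; the proofs are below) =====
def Claim_equal_open_rows : Prop := ∀ (board : List String) (player : String), Dom_open_rows board player → Spec_open_rows board player (open_rows board player)

-- ===== LEMMAS AND PROOFS =====

-- partial sums of f along t, starting from running value v (proof-side model of B's prefix lists)
def pvScan (f : Char → Int) : Int → List Char → List Int
  | _, [] => []
  | v, ch :: t => (v + f ch) :: pvScan f (v + f ch) t

theorem pvPyGetD_append_last (l : List Int) (v : Int) :
    PySem.List.pyGetD (l ++ [v]) (-1) 0 = v := by
  simp [PySem.List.pyGetD, PySem.List.pyGet?, PySem.List.pyIdx?]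

theorem pvFold_scan (f : Char → Int) (t : List Char) :
    ∀ (s : List Int) (v : Int),
      t.foldl (fun pp ch => pp ++ [PySem.List.pyGetD pp (-1) 0 + f ch]) (s ++ [v])
        = s ++ v :: pvScan f v t := by
  induction t with
  | nil => intro s v; simp [pvScan]
  | cons ch t ih =>
      intro s v
      simp only [List.foldl_cons, pvPyGetD_append_last]
      have := ih (s ++ [v]) (v + f ch)
      simpa [pvScan] using this

theorem pvScan_getD (f : Char → Int) (cs : List Char) :
    ∀ (v : Int) (j : Nat), j ≤ cs.length →
      (v :: pvScan f v cs).getD j 0 = v + ((cs.take j).map f).sum := by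
  induction cs with
  | nil =>
      intro v j hj
      have : j = 0 := Nat.le_zero.mp (by simpa using hj)
      subst this; simp
  | cons ch t ih =>
      intro v j hj
      cases j with
      | zero => simp
      | succ j =>
          have h := ih (v + f ch) j (by simpa using hj)
          show ((v + f ch) :: pvScan f (v + f ch) t).getD j 0 = _
          rw [h]
          simp [List.sum_cons]
          ring

theorem pvCount_go_single (c : Char) :
    ∀ (l : List Char) (fuel : Nat) (acc : Nat), l.length ≤ fuel →
      PySem.Chars.count.go [c] fuel l acc = acc + l.count c := by
  intro l
  induction l with
  | nil => intro fuel acc _; cases fuel <;> simp [PySem.Chars.count.go]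
  | cons h t ih =>
      intro fuel acc hf
      cases fuel with
      | zero => simp at hf
      | succ fuel =>
          simp only [PySem.Chars.count.go]
          by_cases hp : [c].isPrefixOf (h :: t) = true
          · rw [if_pos hp]
            have hch : c = h := by simpa [List.isPrefixOf] using hp
            simp only [List.length_cons, List.length_nil, List.drop_succ_cons, List.drop_zero]
            rw [ih fuel (acc + 1) (by simp at hf; omega)]
            subst hch
            simp
            omega
          · rw [if_neg hp]
            have hch : ¬ c = h := by
              intro e; apply hp; subst e; simp [List.isPrefixOf]
            rw [ih fuel acc (by simp at hf; omega)]
            simp [Ne.symm hch]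

theorem pvCount_single (l : List Char) (c : Char) :
    PySem.Chars.count l [c] = l.count c := by
  simp [PySem.Chars.count]
  exact by simpa using pvCount_go_single c l l.length 0 le_rfl

theorem pvCount_go_two_le (sub : List Char) (hs : 2 ≤ sub.length) :
    ∀ (fuel : Nat) (l : List Char) (acc : Nat),
      PySem.Chars.count.go sub fuel l acc ≤ acc + l.length / 2 := by
  intro fuel
  induction fuel with
  | zero => intro l acc; cases l <;> simp [PySem.Chars.count.go]
  | succ fuel ih =>
      intro l acc
      cases l with
      | nil => simp [PySem.Chars.count.go]
      | cons h t =>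
          simp only [PySem.Chars.count.go]
          by_cases hp : sub.isPrefixOf (h :: t) = true
          · rw [if_pos hp]
            have hlen : sub.length ≤ (h :: t).length :=
              List.IsPrefix.length_le (List.isPrefixOf_iff_prefix.mp hp)
            simp only [List.length_cons] at hlen
            calc PySem.Chars.count.go sub fuel (List.drop sub.length (h :: t)) (acc + 1)
                ≤ (acc + 1) + (List.drop sub.length (h :: t)).length / 2 := ih _ _
              _ ≤ acc + (h :: t).length / 2 := by
                  simp only [List.length_drop, List.length_cons]
                  omega
          · rw [if_neg hp]
            calc PySem.Chars.count.go sub fuel t acc ≤ acc + t.length / 2 := ih _ _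
              _ ≤ acc + (h :: t).length / 2 := by
                  simp only [List.length_cons]
                  omega

theorem pvCount_two_le (l sub : List Char) (hs : 2 ≤ sub.length) :
    PySem.Chars.count l sub ≤ l.length / 2 := by
  have h := pvCount_go_two_le sub hs l.length l 0
  have hne : sub.isEmpty = false := by cases sub <;> simp_all
  simpa [PySem.Chars.count, hne] using h

theorem pvMk_eq_iff (l : List Char) (s : String) : (String.ofList l = s) ↔ l = s.toList := by
  constructor
  · intro h; rw [← h, String.toList_ofList]
  · intro h; rw [h, String.ofList_toList]

-- the window condition: A's substring-count test equals B's character-indicator-sum test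
theorem pvCond_iff (w : List Char) (hw : w.length = 4) (player : String) :
    (((PySem.Chars.count w player.toList : Int) = 4 - 1) ∧ ((PySem.Chars.count w ['.'] : Int) = 1))
      ↔ (((w.map (fun ch => if String.ofList [ch] = player then (1:Int) else 0)).sum = 3) ∧
         ((w.map (fun ch => if String.ofList [ch] = pyEMPTY then (1:Int) else 0)).sum = 1)) := by
  rw [show (4 - 1 : Int) = 3 from by norm_num]
  have hE : ((PySem.Chars.count w ['.'] : Int) = 1)
      ↔ (w.map (fun ch => if String.ofList [ch] = pyEMPTY then (1:Int) else 0)).sum = 1 := by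
    rw [pvCount_single]
    have hm : (w.map (fun ch => if String.ofList [ch] = pyEMPTY then (1:Int) else 0)).sum
        = ((w.countP (fun ch => ch == '.')) : Int) := by
      rw [← PySem.List.sum_map_ite_one_zero]
      apply congrArg
      apply List.map_congr_left
      intro ch _
      have hiff : (String.ofList [ch] = pyEMPTY) ↔ ch = '.' := by
        rw [pvMk_eq_iff]; constructor <;> intro h <;> simp_all [pyEMPTY]
      by_cases hch : ch = '.'
      · rw [if_pos (hiff.mpr hch)]; simp [hch]
      · rw [if_neg (fun h => hch (hiff.mp h))]; simp [hch]
    rw [hm, List.count]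
  refine Iff.and ?_ hE
  rcases hpl : player.toList with _ | ⟨c, _ | ⟨c', rest⟩⟩
  · -- player = "": A counts len+1 = 5 ≠ 3, B's indicator is always 0
    constructor
    · intro h; exfalso
      simp [PySem.Chars.count, hw] at h
    · intro h; exfalso
      have hz : ∀ ch ∈ w, (if String.ofList [ch] = player then (1:Int) else 0) = 0 := by
        intro ch _; rw [if_neg]; rw [pvMk_eq_iff, hpl]; simp
      rw [List.map_congr_left hz] at h
      simp at h
  · -- single-character player: substring count = character count
    rw [pvCount_single]
    have hm : (w.map (fun ch => if String.ofList [ch] = player then (1:Int) else 0)).sum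
        = ((w.countP (fun ch => ch == c)) : Int) := by
      rw [← PySem.List.sum_map_ite_one_zero]
      apply congrArg
      apply List.map_congr_left
      intro ch _
      have hiff : (String.ofList [ch] = player) ↔ ch = c := by
        rw [pvMk_eq_iff, hpl]; constructor <;> intro h <;> simp_all
      by_cases hch : ch = c
      · rw [if_pos (hiff.mpr hch)]; simp [hch]
      · rw [if_neg (fun h => hch (hiff.mp h))]; simp [hch]
    rw [hm, List.count]
  · -- player of length ≥ 2: A's count is ≤ 2, B's indicator is always 0
    constructor
    · intro h; exfalso
      have h2 : PySem.Chars.count w (c :: c' :: rest) ≤ w.length / 2 :=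
        pvCount_two_le w (c :: c' :: rest) (by simp)
      rw [hw] at h2
      have h3 : PySem.Chars.count w (c :: c' :: rest) = 3 := by exact_mod_cast h
      omega
    · intro h; exfalso
      have hz : ∀ ch ∈ w, (if String.ofList [ch] = player then (1:Int) else 0) = 0 := by
        intro ch _; rw [if_neg]; rw [pvMk_eq_iff, hpl]
        intro hc; simpa using congrArg List.length hc
      rw [List.map_congr_left hz] at h
      simp at h

theorem pvPs_eq (player row : String) :
    row.toList.foldl (fun (s : List Int × List Int) ch =>
      (s.1 ++ [PySem.List.pyGetD s.1 (-1) 0 + (if String.ofList [ch] = player then 1 else 0)],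
       s.2 ++ [PySem.List.pyGetD s.2 (-1) 0 + (if String.ofList [ch] = pyEMPTY then 1 else 0)]))
      (([0], [0]) : List Int × List Int)
    = ((0 : Int) :: pvScan (fun ch => if String.ofList [ch] = player then 1 else 0) 0 row.toList,
       (0 : Int) :: pvScan (fun ch => if String.ofList [ch] = pyEMPTY then 1 else 0) 0 row.toList) := by
  have hsplit : ∀ (p : List Int × List Int),
      row.toList.foldl (fun (s : List Int × List Int) ch =>
        (s.1 ++ [PySem.List.pyGetD s.1 (-1) 0 + (if String.ofList [ch] = player then 1 else 0)],
         s.2 ++ [PySem.List.pyGetD s.2 (-1) 0 + (if String.ofList [ch] = pyEMPTY then 1 else 0)])) p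
      = (row.toList.foldl (fun s ch => s ++ [PySem.List.pyGetD s (-1) 0 + (if String.ofList [ch] = player then 1 else 0)]) p.1,
         row.toList.foldl (fun s ch => s ++ [PySem.List.pyGetD s (-1) 0 + (if String.ofList [ch] = pyEMPTY then 1 else 0)]) p.2) := by
    induction row.toList with
    | nil => intro p; simp
    | cons ch t ih => intro p; simp [List.foldl_cons, ih]
  rw [hsplit]
  simp only [Prod.mk.injEq]
  constructor <;>
  · show List.foldl _ (([] : List Int) ++ [0]) _ = _
    rw [pvFold_scan]; simp

theorem pvGetD_prefix (f : Char → Int) (cs : List Char) (j : Nat) (hj : j ≤ cs.length) :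
    PySem.List.pyGetD ((0 : Int) :: pvScan f 0 cs) (j : Int) 0 = ((cs.take j).map f).sum := by
  rw [PySem.List.pyGetD_natCast]
  simpa using pvScan_getD f cs 0 j hj

-- per-row inner loops agree
theorem pvRow_eq (player row : String) (acc : Int) :
    (PySem.List.pyRange 0 (PySem.Str.len row - (4 - 1))).foldl (fun acc i =>
      let window := PySem.Str.slice row (some i) (some (i + 4))
      if (PySem.Str.count window player : Int) = 4 - 1 ∧ (PySem.Str.count window pyEMPTY : Int) = 1
      then acc + 1 else acc) acc
    = (PySem.List.pyRange 0 (PySem.Str.len row - 3)).foldl (fun t i =>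
      if PySem.List.pyGetD ((0 : Int) :: pvScan (fun ch => if String.ofList [ch] = player then 1 else 0) 0 row.toList) (i + 4) 0
           - PySem.List.pyGetD ((0 : Int) :: pvScan (fun ch => if String.ofList [ch] = player then 1 else 0) 0 row.toList) i 0 = 3 ∧
         PySem.List.pyGetD ((0 : Int) :: pvScan (fun ch => if String.ofList [ch] = pyEMPTY then 1 else 0) 0 row.toList) (i + 4) 0
           - PySem.List.pyGetD ((0 : Int) :: pvScan (fun ch => if String.ofList [ch] = pyEMPTY then 1 else 0) 0 row.toList) i 0 = 1
      then t + 1 else t) acc := by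
  have h43 : (4 - 1 : Int) = 3 := by norm_num
  rw [h43]
  apply PySem.List.foldl_congr_mem
  intro t i hi
  rw [PySem.List.mem_pyRange_one] at hi
  obtain ⟨h0, hlt⟩ := hi
  lift i to Nat using h0 with k
  rw [PySem.Str.len_eq] at hlt
  have hk4 : k + 4 ≤ row.toList.length := by
    have : (k : Int) < row.toList.length - 3 := hlt
    omega
  -- the window, as a list of characters
  have hwin : (PySem.Str.slice row (some (k : Int)) (some ((k : Int) + 4))).toList
      = (row.toList.drop k).take 4 := by
    rw [PySem.Str.toList_slice]
    rw [PySem.Chars.slice_eq_listSlice]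
    have hcast : ((k : Int) + 4) = ((k + 4 : Nat) : Int) := by push_cast; ring
    rw [hcast, PySem.List.slice_natCast]
    congr 1
    omega
  set w : List Char := (row.toList.drop k).take 4 with hwdef
  have hw : w.length = 4 := by
    rw [hwdef]
    simp only [List.length_take, List.length_drop]
    omega
  -- A's condition in terms of w
  have hcA : ∀ sub : String, (PySem.Str.count (PySem.Str.slice row (some (k : Int)) (some ((k : Int) + 4))) sub : Int)
      = (PySem.Chars.count w sub.toList : Int) := by
    intro sub
    rw [PySem.Str.count_eq, hwin]
  -- B's prefix differences in terms of w
  have hcB : ∀ f : Char → Int,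
      PySem.List.pyGetD ((0 : Int) :: pvScan f 0 row.toList) ((k : Int) + 4) 0
        - PySem.List.pyGetD ((0 : Int) :: pvScan f 0 row.toList) (k : Int) 0
      = (w.map f).sum := by
    intro f
    have hcast : ((k : Int) + 4) = ((k + 4 : Nat) : Int) := by push_cast; ring
    rw [hcast, pvGetD_prefix f row.toList (k + 4) hk4,
        pvGetD_prefix f row.toList k (by omega)]
    rw [List.take_add, List.map_append, List.sum_append, hwdef]
    ring
  simp only [hcA, hcB]
  exact if_congr (pvCond_iff w hw player) rfl rfl

-- ===== VERDICT (by name: the statement is the Claim_ definition above) =====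
theorem open_rows_spec : Claim_equal_open_rows := by
  intro board player _
  unfold Spec_open_rows open_rows open_rows_alt
  apply PySem.List.foldl_congr_mem
  intro acc row _
  simp only [pvPs_eq]
  exact pvRow_eq player row acc
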